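-- pv_equiv track=rewrite | github.com/Dan-jpg2/CSIK_Prog | modul13/d4_4.py | combine_to_rows
-- ===== SOURCE A (Python) =====
-- def get_ip(stream):
--     for line in stream:
--         parts = line.split(" from ")
--         if len(parts) == 2:
--             ip = parts[1]
--         else:
--             ip = "NO IP"
--         yield ip
--
-- def get_action(stream):
--     for line in stream:
--         if 'Accepted' in line:
--             yield 'Accepted'
--         elif 'Failed' in line:
--             yield 'Failed'
--         else:
--             yield 'Other'
--
-- def combine_to_rows(filtered_lines):
--     lines = list(filtered_lines)
--
--     actions = list(get_action(lines))
--     ips = list(get_ip(lines))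
--
--     rows = []
--     for i in range(len(lines)):
--         rows.append([actions[i], ips[i]])
--     return rows
-- ===== SOURCE B (Python) =====
-- def combine_to_rows(filtered_lines):
--     rows = []
--     for line in filtered_lines:
--         action = "Accepted" if "Accepted" in line else ("Failed" if "Failed" in line else "Other")
--         parts = line.split(" from ")
--         rows.append([action, parts[1] if len(parts) == 2 else "NO IP"])
--     return rows
-- ===== Notes on version B (the rewrite author's own statement) =====
-- stated objective: simpler
-- what changed: B builds each [action, ip] row in one direct pass over the lines, replacing A's two generator-materialized parallel lists plus an index-zip loop over range(len(lines)).
import Mathlib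
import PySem

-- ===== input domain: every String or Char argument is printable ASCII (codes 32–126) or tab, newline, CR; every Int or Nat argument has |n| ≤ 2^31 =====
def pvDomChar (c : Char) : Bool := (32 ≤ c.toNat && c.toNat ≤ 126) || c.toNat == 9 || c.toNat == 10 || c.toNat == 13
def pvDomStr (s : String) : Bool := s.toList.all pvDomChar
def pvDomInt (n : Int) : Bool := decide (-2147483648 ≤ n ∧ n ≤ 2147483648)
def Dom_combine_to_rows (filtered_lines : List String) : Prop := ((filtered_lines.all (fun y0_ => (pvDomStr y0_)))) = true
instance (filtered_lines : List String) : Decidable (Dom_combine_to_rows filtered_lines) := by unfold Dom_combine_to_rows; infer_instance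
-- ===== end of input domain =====

-- B builds each [action, ip] row in one direct pass, replacing A's two materialized parallel lists plus index-zip loop.

-- line.split(" from "): sep is a fixed nonempty literal, so PySem.Str.split? is always `some`; the getD default is never reached.
def pySplitFrom (line : String) : List String := (PySem.Str.split? line " from ").getD []

-- ===== PORT A =====
-- helper get_ip: generator over the stream, materialized by list(...)
def get_ip_list (stream : List String) : List String :=
  stream.foldl (fun acc line =>
    let parts := pySplitFrom line
    let ip := if parts.length == 2 then PySem.List.pyGetD parts 1 "" else "NO IP"
    acc ++ [ip]) []

-- helper get_action: generator over the stream, materialized by list(...)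
def get_action_list (stream : List String) : List String :=
  stream.foldl (fun acc line =>
    (if PySem.Str.isIn "Accepted" line then acc ++ ["Accepted"]
     else if PySem.Str.isIn "Failed" line then acc ++ ["Failed"]
     else acc ++ ["Other"])) []

def combine_to_rows (filtered_lines : List String) : List (List String) :=
  let lines := filtered_lines
  let actions := get_action_list lines
  let ips := get_ip_list lines
  (PySem.List.pyRange 0 (lines.length : Int) 1).foldl
    (fun rows i => rows ++ [[PySem.List.pyGetD actions i "", PySem.List.pyGetD ips i ""]]) []

-- ===== PORT B =====
def combine_to_rows_alt (filtered_lines : List String) : List (List String) :=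
  filtered_lines.foldl (fun rows line =>
    let action := if PySem.Str.isIn "Accepted" line then "Accepted"
                  else if PySem.Str.isIn "Failed" line then "Failed"
                  else "Other"
    let parts := pySplitFrom line
    rows ++ [[action, if parts.length == 2 then PySem.List.pyGetD parts 1 "" else "NO IP"]]) []

-- ===== PRECONDITION & SPEC =====
def Spec_combine_to_rows (filtered_lines : List String) (out : List (List String)) : Prop := out = combine_to_rows_alt filtered_lines
instance (filtered_lines : List String) (out : List (List String)) : Decidable (Spec_combine_to_rows filtered_lines out) := by unfold Spec_combine_to_rows; infer_instance

-- ===== CLAIM (what is proved, stated in full; the proofs are below) =====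
def Claim_equal_combine_to_rows : Prop := ∀ (filtered_lines : List String), Dom_combine_to_rows filtered_lines → Spec_combine_to_rows filtered_lines (combine_to_rows filtered_lines)

-- ===== LEMMAS AND PROOFS =====

def pvAct (line : String) : String :=
  if PySem.Str.isIn "Accepted" line then "Accepted"
  else if PySem.Str.isIn "Failed" line then "Failed"
  else "Other"

def pvIp (line : String) : String :=
  let parts := pySplitFrom line
  if parts.length == 2 then PySem.List.pyGetD parts 1 "" else "NO IP"

theorem get_action_list_eq_map (stream : List String) :
    get_action_list stream = stream.map pvAct := by
  have h : get_action_list stream =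
      stream.foldl (fun acc line => acc ++ [pvAct line]) [] := by
    unfold get_action_list
    apply PySem.List.foldl_congr_mem
    intro acc line _
    unfold pvAct
    split_ifs <;> rfl
  rw [h, PySem.List.foldl_append_singleton_eq_map]
  simp

theorem get_ip_list_eq_map (stream : List String) :
    get_ip_list stream = stream.map pvIp := by
  have h : get_ip_list stream =
      stream.foldl (fun acc line => acc ++ [pvIp line]) [] := rfl
  rw [h, PySem.List.foldl_append_singleton_eq_map]
  simp

theorem alt_eq_map (filtered_lines : List String) :
    combine_to_rows_alt filtered_lines = filtered_lines.map (fun l => [pvAct l, pvIp l]) := by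
  have h : combine_to_rows_alt filtered_lines =
      filtered_lines.foldl (fun rows line => rows ++ [[pvAct line, pvIp line]]) [] := rfl
  rw [h, PySem.List.foldl_append_singleton_eq_map]
  simp

-- ===== VERDICT (by name: the statement is the Claim_ definition above) =====
theorem combine_to_rows_spec : Claim_equal_combine_to_rows := by
  intro filtered_lines _
  unfold Spec_combine_to_rows
  show (PySem.List.pyRange 0 (filtered_lines.length : Int) 1).foldl
      (fun rows i => rows ++ [[PySem.List.pyGetD (get_action_list filtered_lines) i "",
                               PySem.List.pyGetD (get_ip_list filtered_lines) i ""]]) []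
    = combine_to_rows_alt filtered_lines
  rw [alt_eq_map, get_action_list_eq_map, get_ip_list_eq_map,
      PySem.List.foldl_append_singleton_eq_map, List.nil_append,
      PySem.List.pyRange_zero_natCast, List.map_map]
  apply List.ext_getElem
  · simp
  · intro i h1 h2
    simp only [List.length_map, List.length_range] at h1
    simp [List.getElem_map, List.getElem_range, PySem.List.pyGetD_natCast,
          List.getD_eq_getElem?_getD, List.getElem?_map, List.getElem?_eq_getElem h1]
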